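-- pv_equiv track=rewrite | github.com/rhilt13/PyINETA | ineta_functions_v1.py | MatchTag
-- ===== SOURCE A (Python) =====
-- def MatchTag (match_peaks,candidate_peaks,unknown_conn):
-- 	final_match={}
-- 	no_match={}
-- 	hits=0
-- 	for i in unknown_conn:
-- 		key=i[0]+"-"+i[1]
-- 		if i[0] in match_peaks:
-- 			if i[1] in match_peaks:
-- 				final_match.setdefault(key, []).append(match_peaks[i[0]])
-- 				final_match[key].append(match_peaks[i[1]])
-- 			else:
-- 				no_match.setdefault(key, []).append(match_peaks[i[0]])
-- 				no_match[key].append("?")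
-- 		else:
-- 			no_match.setdefault(key, []).append("?")
-- 			no_match[key].append("?")
-- 	for key,val in list(final_match.items()):
-- 		if (val[0] != val[1]):
-- 			hits=hits+1
--
-- 	# hits=len(final_match.keys())
-- 	# print "Match",len(final_match.keys()),hits,final_match
-- 	return (final_match,no_match,hits)
-- ===== SOURCE B (Python) =====
-- def MatchTag(match_peaks, candidate_peaks, unknown_conn):
--     # One pass: the mismatch count is updated at the moment a final_match key is
--     # first created (only its first two values ever matter), instead of a second
--     # pass over final_match afterwards.
--     final_match = {}
--     no_match = {}
--     hits = 0
--     for a, b in unknown_conn: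
--         key = a + "-" + b
--         if a in match_peaks and b in match_peaks:
--             v0, v1 = match_peaks[a], match_peaks[b]
--             if key in final_match:
--                 final_match[key] += [v0, v1]
--             else:
--                 final_match[key] = [v0, v1]
--                 if v0 != v1:
--                     hits += 1
--         elif a in match_peaks:
--             no_match.setdefault(key, []).extend([match_peaks[a], "?"])
--         else:
--             no_match.setdefault(key, []).extend(["?", "?"])
--     return (final_match, no_match, hits)
-- ===== Notes on version B (the rewrite author's own statement) =====
-- stated objective: alternative
-- what changed: A builds the dicts and then runs a second pass over final_match.items() to count mismatched value pairs; B folds that count into the single pass, incrementing hits exactly when a final_match key is first created with two differing values, so the second pass disappears.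
import Mathlib
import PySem

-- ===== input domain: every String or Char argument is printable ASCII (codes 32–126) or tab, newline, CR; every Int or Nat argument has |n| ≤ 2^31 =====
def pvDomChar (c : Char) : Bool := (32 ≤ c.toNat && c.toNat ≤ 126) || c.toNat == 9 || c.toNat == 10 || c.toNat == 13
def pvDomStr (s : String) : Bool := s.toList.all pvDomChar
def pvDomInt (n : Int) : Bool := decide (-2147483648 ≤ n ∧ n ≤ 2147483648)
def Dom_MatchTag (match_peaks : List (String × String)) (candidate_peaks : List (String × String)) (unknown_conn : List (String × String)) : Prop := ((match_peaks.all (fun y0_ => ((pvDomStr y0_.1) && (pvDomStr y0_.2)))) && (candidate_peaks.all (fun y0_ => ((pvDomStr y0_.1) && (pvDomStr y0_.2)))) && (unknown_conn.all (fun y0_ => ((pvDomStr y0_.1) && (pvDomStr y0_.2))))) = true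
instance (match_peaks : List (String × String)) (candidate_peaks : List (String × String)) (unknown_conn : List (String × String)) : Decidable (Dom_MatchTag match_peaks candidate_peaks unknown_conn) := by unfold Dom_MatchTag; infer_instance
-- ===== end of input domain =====

-- B folds A's second counting pass over final_match into the single loop over unknown_conn,
-- incrementing hits exactly when a final_match key is first created (alternative decomposition).


-- ===== PORT A =====
-- step of A's first loop over unknown_conn: setdefault + two appends (append = modify with ++ [v])
def mtStepA (m : PySem.Dict String String)
    (s : PySem.Dict String (List String) × PySem.Dict String (List String))
    (i : String × String) :
    PySem.Dict String (List String) × PySem.Dict String (List String) :=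
  let key := i.1 ++ "-" ++ i.2
  match m.get? i.1 with
  | some v0 =>
    match m.get? i.2 with
    | some v1 => (((s.1.setdefault key []).modify key [] (· ++ [v0])).modify key [] (· ++ [v1]), s.2)
    | none    => (s.1, ((s.2.setdefault key []).modify key [] (· ++ [v0])).modify key [] (· ++ ["?"]))
  | none      => (s.1, ((s.2.setdefault key []).modify key [] (· ++ ["?"])).modify key [] (· ++ ["?"]))

-- A's second loop: for key,val in final_match.items(): if val[0] != val[1]: hits += 1
-- (every final_match value is created with two appends, so val[0]/val[1] exist and the
--  pyGetD default "" is never read)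
def mtHitsA (items : List (String × List String)) : Int :=
  items.foldl (fun h p =>
    if PySem.List.pyGetD p.2 0 "" ≠ PySem.List.pyGetD p.2 1 "" then h + 1 else h) 0

def MatchTag (match_peaks : List (String × String)) (candidate_peaks : List (String × String)) (unknown_conn : List (String × String)) : (List (String × List String)) × (List (String × List String)) × Int :=
  let m := PySem.Dict.ofList match_peaks
  let r := unknown_conn.foldl (mtStepA m) (PySem.Dict.empty, PySem.Dict.empty)
  (r.1.items, r.2.items, mtHitsA r.1.items)

-- ===== PORT B =====
-- single-pass step: final_match, no_match and the running hits count together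
def mtStepB (m : PySem.Dict String String)
    (s : PySem.Dict String (List String) × PySem.Dict String (List String) × Int)
    (i : String × String) :
    PySem.Dict String (List String) × PySem.Dict String (List String) × Int :=
  let key := i.1 ++ "-" ++ i.2
  match m.get? i.1, m.get? i.2 with
  | some v0, some v1 =>
      if s.1.contains key then (s.1.modify key [] (· ++ [v0, v1]), s.2.1, s.2.2)
      else (s.1.insert key [v0, v1], s.2.1, if v0 ≠ v1 then s.2.2 + 1 else s.2.2)
  | some v0, none => (s.1, s.2.1.modify key [] (· ++ [v0, "?"]), s.2.2)
  | none, _       => (s.1, s.2.1.modify key [] (· ++ ["?", "?"]), s.2.2)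

def MatchTag_alt (match_peaks : List (String × String)) (candidate_peaks : List (String × String)) (unknown_conn : List (String × String)) : (List (String × List String)) × (List (String × List String)) × Int :=
  let m := PySem.Dict.ofList match_peaks
  let r := unknown_conn.foldl (mtStepB m) (PySem.Dict.empty, PySem.Dict.empty, 0)
  (r.1.items, r.2.1.items, r.2.2)

-- ===== PRECONDITION & SPEC =====
def Spec_MatchTag (match_peaks : List (String × String)) (candidate_peaks : List (String × String)) (unknown_conn : List (String × String)) (out : (List (String × List String)) × (List (String × List String)) × Int) : Prop := out = MatchTag_alt match_peaks candidate_peaks unknown_conn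
instance (match_peaks : List (String × String)) (candidate_peaks : List (String × String)) (unknown_conn : List (String × String)) (out : (List (String × List String)) × (List (String × List String)) × Int) : Decidable (Spec_MatchTag match_peaks candidate_peaks unknown_conn out) := by unfold Spec_MatchTag; infer_instance

-- ===== CLAIM (what is proved, stated in full; the proofs are below) =====
def Claim_equal_MatchTag : Prop := ∀ (match_peaks : List (String × String)) (candidate_peaks : List (String × String)) (unknown_conn : List (String × String)), Dom_MatchTag match_peaks candidate_peaks unknown_conn → Spec_MatchTag match_peaks candidate_peaks unknown_conn (MatchTag match_peaks candidate_peaks unknown_conn)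

-- ===== LEMMAS AND PROOFS =====

-- setdefault(k, []) followed by two appends is one append of both values
lemma setdefault_modify_modify (d : PySem.Dict String (List String)) (k : String) (x y : String) :
    ((d.setdefault k []).modify k [] (· ++ [x])).modify k [] (· ++ [y])
      = d.modify k [] (· ++ [x, y]) := by
  by_cases h : d.contains k = true
  · rw [PySem.Dict.setdefault_of_contains d _ h]
    simp only [PySem.Dict.modify, PySem.Dict.getD_insert_self, PySem.Dict.insert_insert_self,
      List.append_assoc, List.cons_append, List.nil_append]
  · rw [PySem.Dict.setdefault_of_not_contains d _ (by simpa using h)]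
    simp only [PySem.Dict.modify, PySem.Dict.getD_insert_self, PySem.Dict.insert_insert_self,
      PySem.Dict.getD_of_not_contains d _ (by simpa using h),
      List.cons_append, List.nil_append]

-- appending to a list of length ≥ 2 does not change its first two elements
lemma pyGetD_append_of_two_le {l : List String} (t : List String) (h : 2 ≤ l.length)
    (k : Nat) (hk : k < 2) :
    PySem.List.pyGetD (l ++ t) (k : Int) "" = PySem.List.pyGetD l (k : Int) "" := by
  rw [PySem.List.pyGetD_of_nonneg _ _ (by omega), PySem.List.pyGetD_of_nonneg _ _ (by omega)]
  simp only [Int.toNat_natCast]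
  exact List.getD_append l t "" k (by omega)

-- the hits fold over items where one entry's list was extended (first two elements kept)
lemma mtHitsA_map_modify (items : List (String × List String)) (k : String) (w : List String)
    (hw : ∀ p ∈ items, p.1 = k → PySem.List.pyGetD w 0 "" = PySem.List.pyGetD p.2 0 ""
            ∧ PySem.List.pyGetD w 1 "" = PySem.List.pyGetD p.2 1 "") :
    mtHitsA (items.map (fun p => if (p.1 == k) = true then (k, w) else p)) = mtHitsA items := by
  unfold mtHitsA
  rw [List.foldl_map]
  apply PySem.List.foldl_congr_mem
  intro acc p hp
  by_cases hpk : p.1 = k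
  · obtain ⟨h0, h1⟩ := hw p hp hpk
    simp [hpk, h0, h1]
  · simp [hpk]

-- the hits fold over items with one fresh entry appended
lemma mtHitsA_append (items : List (String × List String)) (k : String) (w : List String) :
    mtHitsA (items ++ [(k, w)])
      = if PySem.List.pyGetD w 0 "" ≠ PySem.List.pyGetD w 1 "" then mtHitsA items + 1
        else mtHitsA items := by
  unfold mtHitsA
  rw [List.foldl_append]
  simp

-- invariant: every final_match value has at least two elements
def mtInv (d : PySem.Dict String (List String)) : Prop :=
  d.keys.Nodup ∧ ∀ p ∈ d.items, 2 ≤ p.2.length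

-- the core loop correspondence: B's fold carries exactly A's hit count of the current final_match
lemma mt_loop_eq (m : PySem.Dict String String) :
    ∀ (uc : List (String × String)) (fm nm : PySem.Dict String (List String)),
    mtInv fm →
    List.foldl (mtStepB m) (fm, nm, mtHitsA fm.items) uc
      = ((List.foldl (mtStepA m) (fm, nm) uc).1, (List.foldl (mtStepA m) (fm, nm) uc).2,
         mtHitsA (List.foldl (mtStepA m) (fm, nm) uc).1.items) := by
  intro uc
  induction uc with
  | nil => intro fm nm _; rfl
  | cons i rest ih =>
    intro fm nm hinv
    obtain ⟨hnd, hlen⟩ := hinv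
    simp only [List.foldl_cons]
    -- compute one step of both folds
    have hstepA : mtStepA m (fm, nm) i =
        (match m.get? i.1, m.get? i.2 with
         | some v0, some v1 => (fm.modify (i.1 ++ "-" ++ i.2) [] (· ++ [v0, v1]), nm)
         | some v0, none    => (fm, nm.modify (i.1 ++ "-" ++ i.2) [] (· ++ [v0, "?"]))
         | none, _          => (fm, nm.modify (i.1 ++ "-" ++ i.2) [] (· ++ ["?", "?"]))) := by
      unfold mtStepA
      rcases h1 : m.get? i.1 with _ | v0 <;> rcases h2 : m.get? i.2 with _ | v1 <;>
        simp [setdefault_modify_modify]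
    rcases h1 : m.get? i.1 with _ | v0 <;> rcases h2 : m.get? i.2 with _ | v1
    -- none, none / none, some : only no_match changes
    case none.none =>
      rw [show mtStepB m (fm, nm, mtHitsA fm.items) i
            = (fm, nm.modify (i.1 ++ "-" ++ i.2) [] (· ++ ["?", "?"]), mtHitsA fm.items) by
          unfold mtStepB; simp [h1]]
      rw [show mtStepA m (fm, nm) i
            = (fm, nm.modify (i.1 ++ "-" ++ i.2) [] (· ++ ["?", "?"])) by rw [hstepA]; simp [h1]]
      exact ih _ _ ⟨hnd, hlen⟩
    case none.some =>
      rw [show mtStepB m (fm, nm, mtHitsA fm.items) i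
            = (fm, nm.modify (i.1 ++ "-" ++ i.2) [] (· ++ ["?", "?"]), mtHitsA fm.items) by
          unfold mtStepB; simp [h1]]
      rw [show mtStepA m (fm, nm) i
            = (fm, nm.modify (i.1 ++ "-" ++ i.2) [] (· ++ ["?", "?"])) by rw [hstepA]; simp [h1]]
      exact ih _ _ ⟨hnd, hlen⟩
    case some.none =>
      rw [show mtStepB m (fm, nm, mtHitsA fm.items) i
            = (fm, nm.modify (i.1 ++ "-" ++ i.2) [] (· ++ [v0, "?"]), mtHitsA fm.items) by
          unfold mtStepB; simp [h1, h2]]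
      rw [show mtStepA m (fm, nm) i
            = (fm, nm.modify (i.1 ++ "-" ++ i.2) [] (· ++ [v0, "?"])) by rw [hstepA]; simp [h1, h2]]
      exact ih _ _ ⟨hnd, hlen⟩
    case some.some =>
      rw [show mtStepA m (fm, nm) i
            = (fm.modify (i.1 ++ "-" ++ i.2) [] (· ++ [v0, v1]), nm) by rw [hstepA]; simp [h1, h2]]
      set key := i.1 ++ "-" ++ i.2 with hkey
      by_cases hc : fm.contains key = true
      · -- existing key: both sides modify; the hit count is unchanged
        have hB : mtStepB m (fm, nm, mtHitsA fm.items) i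
            = (fm.modify key [] (· ++ [v0, v1]), nm, mtHitsA fm.items) := by
          unfold mtStepB; simp [h1, h2, ← hkey, hc]
        rw [hB]
        have hfm' : (fm.modify key [] (· ++ [v0, v1])) = fm.insert key (fm.getD key [] ++ [v0, v1]) := rfl
        have hitems : (fm.modify key [] (· ++ [v0, v1])).items
            = fm.items.map (fun p => if (p.1 == key) = true then (key, fm.getD key [] ++ [v0, v1]) else p) := by
          rw [hfm', PySem.Dict.items_insert_of_contains _ _ hc]
        have hhits : mtHitsA (fm.modify key [] (· ++ [v0, v1])).items = mtHitsA fm.items := by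
          rw [hitems]
          apply mtHitsA_map_modify
          intro p hp hpk
          have hval : fm.getD key [] = p.2 := by
            rw [← hpk]
            exact PySem.Dict.getD_of_mem_items fm (by simpa using hp) hnd []
          rw [hval]
          exact ⟨pyGetD_append_of_two_le _ (hlen p hp) 0 (by omega),
                 pyGetD_append_of_two_le _ (hlen p hp) 1 (by omega)⟩
        rw [← hhits]
        apply ih
        constructor
        · rw [hfm']; exact PySem.Dict.nodup_keys_insert _ _ _ hnd
        · intro p hp
          rw [hfm'] at hp
          rcases (PySem.Dict.mem_items_insert _ _ _ _).1 hp with h | ⟨h, _⟩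
          · subst h
            simp only [List.length_append, List.length_cons, List.length_nil]
            omega
          · exact hlen p h
      · -- new key: B increments hits now, A appends the entry and counts it in the second pass
        have hc' : fm.contains key = false := by simpa using hc
        have hB : mtStepB m (fm, nm, mtHitsA fm.items) i
            = (fm.insert key [v0, v1], nm, if v0 ≠ v1 then mtHitsA fm.items + 1 else mtHitsA fm.items) := by
          unfold mtStepB; simp [h1, h2, ← hkey, hc']
        rw [hB]
        have hfm' : fm.modify key [] (· ++ [v0, v1]) = fm.insert key [v0, v1] := by
          unfold PySem.Dict.modify
          rw [PySem.Dict.getD_of_not_contains fm _ hc']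
          rfl
        rw [hfm']
        have hhits : mtHitsA (fm.insert key [v0, v1]).items
            = if v0 ≠ v1 then mtHitsA fm.items + 1 else mtHitsA fm.items := by
          rw [PySem.Dict.items_insert_of_not_contains _ _ hc', mtHitsA_append]
          have e0 : PySem.List.pyGetD [v0, v1] (0 : Int) "" = v0 := by
            simpa using PySem.List.pyGetD_ofNat' [v0, v1] 0 ""
          have e1 : PySem.List.pyGetD [v0, v1] (1 : Int) "" = v1 := by
            simpa using PySem.List.pyGetD_ofNat' [v0, v1] 1 ""
          rw [e0, e1]
        rw [← hhits]
        apply ih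
        constructor
        · exact PySem.Dict.nodup_keys_insert _ _ _ hnd
        · intro p hp
          rcases (PySem.Dict.mem_items_insert _ _ _ _).1 hp with h | ⟨h, _⟩
          · subst h; simp
          · exact hlen p h

-- ===== VERDICT (by name: the statement is the Claim_ definition above) =====
theorem MatchTag_spec : Claim_equal_MatchTag := by
  intro mp cp uc _
  unfold Spec_MatchTag
  dsimp only [MatchTag, MatchTag_alt]
  have h := mt_loop_eq (PySem.Dict.ofList mp) uc PySem.Dict.empty PySem.Dict.empty
    ⟨by simp, by intro p hp; simp [PySem.Dict.empty] at hp⟩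
  have h0 : mtHitsA (PySem.Dict.empty : PySem.Dict String (List String)).items = 0 := rfl
  rw [h0] at h
  rw [h]
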